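-- pv_equiv track=rewrite | github.com/Tucuxi-Inc/CreatureMind | core/agents/memory_agent.py | _parse_memory_response
-- ===== SOURCE A (Python) =====
-- from typing import Dict, Any, Optional, List
--
-- def _parse_memory_response(response: str) -> Dict[str, Any]:
--     """Parse the AI response into structured memory data"""
--
--     memory_data = {
--         "relevant_memories": "",
--         "patterns": "",
--         "relationship": "neutral",
--         "context_impact": ""
--     }
--
--     lines = response.strip().split('\n')
--     for line in lines:
--         if ':' in line:
--             key, value = line.split(':', 1)
--             key = key.strip().upper().replace('_', '_')
--             value = value.strip()
--
--             if key == "RELEVANT_MEMORIES":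
--                 memory_data["relevant_memories"] = value
--             elif key == "PATTERNS":
--                 memory_data["patterns"] = value
--             elif key == "RELATIONSHIP":
--                 memory_data["relationship"] = value.lower()
--             elif key == "CONTEXT_IMPACT":
--                 memory_data["context_impact"] = value
--
--     return memory_data
-- ===== SOURCE B (Python) =====
-- def _parse_memory_response(response: str):
--     """Parse the AI response into structured memory data (per-field backward search)."""
--     lines = response.strip().split('\n')
--
--     def last_value(target):
--         # last occurrence wins = first match scanning from the end
--         for line in reversed(lines):
--             if ':' in line:
--                 key, value = line.split(':', 1)
--                 if key.strip().upper() == target: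
--                     return value.strip()
--         return None
--
--     rm = last_value("RELEVANT_MEMORIES")
--     pt = last_value("PATTERNS")
--     rel = last_value("RELATIONSHIP")
--     ci = last_value("CONTEXT_IMPACT")
--     return {
--         "relevant_memories": rm if rm is not None else "",
--         "patterns": pt if pt is not None else "",
--         "relationship": rel.lower() if rel is not None else "neutral",
--         "context_impact": ci if ci is not None else "",
--     }
-- ===== Notes on version B (the rewrite author's own statement) =====
-- stated objective: alternative
-- what changed: Replaces A's single forward pass that dispatches each line through an if/elif chain into a mutable fixed-key record by four independent backward searches: for each of the four fields, B scans the lines from the end and returns the first (i.e. last-occurring) matching value, with no record mutation and no dispatch (relationship lowered on the found value, 'neutral' when absent).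
import Mathlib
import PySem

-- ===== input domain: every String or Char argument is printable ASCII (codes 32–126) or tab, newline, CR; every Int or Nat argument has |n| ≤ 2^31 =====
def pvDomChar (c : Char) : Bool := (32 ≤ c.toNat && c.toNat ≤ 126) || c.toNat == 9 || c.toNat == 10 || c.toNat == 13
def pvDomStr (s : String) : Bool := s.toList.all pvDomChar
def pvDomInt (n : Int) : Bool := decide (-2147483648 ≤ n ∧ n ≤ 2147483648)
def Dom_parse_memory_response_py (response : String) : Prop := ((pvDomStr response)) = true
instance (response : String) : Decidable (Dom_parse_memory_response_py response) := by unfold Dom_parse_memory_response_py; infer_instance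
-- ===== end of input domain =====

-- B replaces A's single forward pass with if/elif dispatch into a mutable record by four
-- independent backward searches (last occurrence wins = first match from the end), no dict; objective: alternative.

-- ===== PORT A =====
-- one loop iteration of A: dispatch the line into the fixed memory_data dict
def pvAStep (md : PySem.Dict String String) (line : String) : PySem.Dict String String :=
  if PySem.Str.isIn ":" line then
    match PySem.Str.splitMax? line ":" 1 with
    | some (k :: v :: _) =>
      let key := PySem.Str.replace (PySem.Str.upper (PySem.Str.strip k)) "_" "_"
      let value := PySem.Str.strip v
      if key = "RELEVANT_MEMORIES" then md.insert "relevant_memories" value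
      else if key = "PATTERNS" then md.insert "patterns" value
      else if key = "RELATIONSHIP" then md.insert "relationship" (PySem.Str.lower value)
      else if key = "CONTEXT_IMPACT" then md.insert "context_impact" value
      else md
    | _ => md   -- unreachable: ':' in line guarantees split(':',1) yields two parts
  else md

def parse_memory_response_py (response : String) : List (String × String) :=
  let memory_data : PySem.Dict String String :=
    PySem.Dict.ofList [("relevant_memories", ""), ("patterns", ""),
                       ("relationship", "neutral"), ("context_impact", "")]
  let lines := (PySem.Str.split? (PySem.Str.strip response) "\n").getD []
  (lines.foldl pvAStep memory_data).items

-- ===== PORT B =====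
-- the value a single line contributes for the given target key (none if it does not match)
def pvLineVal (t line : String) : Option String :=
  if PySem.Str.isIn ":" line then
    match PySem.Str.splitMax? line ":" 1 with
    | some (k :: v :: _) =>
      if PySem.Str.upper (PySem.Str.strip k) = t then some (PySem.Str.strip v) else none
    | _ => none   -- unreachable: ':' in line guarantees split(':',1) yields two parts
  else none

-- B's loop 'for line in reversed(lines): … return …' — first match wins
def pvFindGo (t : String) : List String → Option String
  | [] => none
  | l :: rest =>
    match pvLineVal t l with
    | some v => some v
    | none => pvFindGo t rest

def pvFind (lines : List String) (t : String) : Option String := pvFindGo t lines.reverse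

def parse_memory_response_py_alt (response : String) : List (String × String) :=
  let lines := (PySem.Str.split? (PySem.Str.strip response) "\n").getD []
  [("relevant_memories", (pvFind lines "RELEVANT_MEMORIES").getD ""),
   ("patterns", (pvFind lines "PATTERNS").getD ""),
   ("relationship", match pvFind lines "RELATIONSHIP" with
                    | some v => PySem.Str.lower v
                    | none => "neutral"),
   ("context_impact", (pvFind lines "CONTEXT_IMPACT").getD "")]

-- ===== PRECONDITION & SPEC =====
def Spec_parse_memory_response_py (response : String) (out : List (String × String)) : Prop := out = parse_memory_response_py_alt response
instance (response : String) (out : List (String × String)) : Decidable (Spec_parse_memory_response_py response out) := by unfold Spec_parse_memory_response_py; infer_instance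

-- ===== CLAIM (what is proved, stated in full; the proofs are below) =====
def Claim_equal_parse_memory_response_py : Prop := ∀ (response : String), Dom_parse_memory_response_py response → Spec_parse_memory_response_py response (parse_memory_response_py response)

-- ===== LEMMAS AND PROOFS =====

-- A's fixed four-key record
def pvMk4 (a b c e : String) : PySem.Dict String String :=
  PySem.Dict.mk [("relevant_memories", a), ("patterns", b), ("relationship", c), ("context_impact", e)]

-- s.replace('_','_') is the identity (A's dead normalization step)
lemma chars_replace_go_self (old : List Char) :
    ∀ (fuel : Nat) (l acc : List Char),
      PySem.Chars.replace.go old old fuel l acc = acc.reverse ++ l := by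
  intro fuel
  induction fuel with
  | zero => intro l acc; rfl
  | succ n ih =>
    intro l acc
    cases l with
    | nil => simp [PySem.Chars.replace.go]
    | cons c t =>
      rw [PySem.Chars.replace.go]
      split_ifs with h
      · obtain ⟨r, hr⟩ := List.isPrefixOf_iff_prefix.mp h
        rw [ih, ← hr]
        simp
      · rw [ih]; simp

lemma chars_replace_self (cs : List Char) :
    PySem.Chars.replace cs ['_'] ['_'] = cs := by
  unfold PySem.Chars.replace
  simp [chars_replace_go_self]

lemma str_replace_underscore_self (s : String) :
    PySem.Str.replace s "_" "_" = s := by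
  show String.ofList (PySem.Chars.replace s.toList "_".toList "_".toList) = s
  have : "_".toList = ['_'] := rfl
  rw [this, chars_replace_self]
  simp

-- the four possible updates of A's fixed four-key record
lemma mk4_ins1 (a b c e v : String) :
    (pvMk4 a b c e).insert "relevant_memories" v = pvMk4 v b c e := by
  apply PySem.Dict.ext
  simp [pvMk4, PySem.Dict.insert, PySem.Dict.contains]

lemma mk4_ins2 (a b c e v : String) :
    (pvMk4 a b c e).insert "patterns" v = pvMk4 a v c e := by
  apply PySem.Dict.ext
  simp [pvMk4, PySem.Dict.insert, PySem.Dict.contains]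

lemma mk4_ins3 (a b c e v : String) :
    (pvMk4 a b c e).insert "relationship" v = pvMk4 a b v e := by
  apply PySem.Dict.ext
  simp [pvMk4, PySem.Dict.insert, PySem.Dict.contains]

lemma mk4_ins4 (a b c e v : String) :
    (pvMk4 a b c e).insert "context_impact" v = pvMk4 a b c v := by
  apply PySem.Dict.ext
  simp [pvMk4, PySem.Dict.insert, PySem.Dict.contains]

-- A's step, rephrased through pvLineVal: each field is overwritten iff the line matches it
lemma step_eq (a b c e : String) (line : String) :
    pvAStep (pvMk4 a b c e) line =
      pvMk4 ((pvLineVal "RELEVANT_MEMORIES" line).getD a)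
            ((pvLineVal "PATTERNS" line).getD b)
            (match pvLineVal "RELATIONSHIP" line with
             | some v => PySem.Str.lower v | none => c)
            ((pvLineVal "CONTEXT_IMPACT" line).getD e) := by
  unfold pvAStep pvLineVal
  split_ifs with hin
  · cases hsp : PySem.Str.splitMax? line ":" 1 with
    | none => rfl
    | some parts =>
      cases parts with
      | nil => rfl
      | cons k rest =>
        cases rest with
        | nil => rfl
        | cons v rest2 =>
          simp only [str_replace_underscore_self]
          set K := PySem.Str.upper (PySem.Str.strip k) with hK
          by_cases h1 : K = "RELEVANT_MEMORIES"
          · simp [h1, mk4_ins1]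
          · by_cases h2 : K = "PATTERNS"
            · simp [h2, mk4_ins2]
            · by_cases h3 : K = "RELATIONSHIP"
              · simp [h3, mk4_ins3]
              · by_cases h4 : K = "CONTEXT_IMPACT"
                · simp [h4, mk4_ins4]
                · simp [h1, h2, h3, h4]
  · rfl

-- first match in xs ++ ys: xs wins
lemma pvFindGo_append (t : String) (xs ys : List String) :
    pvFindGo t (xs ++ ys) =
      match pvFindGo t xs with
      | some v => some v
      | none => pvFindGo t ys := by
  induction xs with
  | nil => simp [pvFindGo]
  | cons l rest ih =>
    simp only [List.cons_append, pvFindGo]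
    cases pvLineVal t l with
    | some v => rfl
    | none => exact ih

-- peeling the FIRST line off a backward search: the rest takes priority, the head is the fallback
lemma pvFind_cons (l : String) (rest : List String) (t : String) :
    pvFind (l :: rest) t =
      match pvFind rest t with
      | some v => some v
      | none => pvLineVal t l := by
  unfold pvFind
  rw [List.reverse_cons, pvFindGo_append]
  cases pvFindGo t rest.reverse with
  | some v => rfl
  | none => simp only [pvFindGo]; cases pvLineVal t l <;> rfl

-- A's left fold over the lines computes, field by field, the last matching value (or the start value)
lemma fold_char (lines : List String) : ∀ (a b c e : String),
    lines.foldl pvAStep (pvMk4 a b c e) =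
      pvMk4 ((pvFind lines "RELEVANT_MEMORIES").getD a)
            ((pvFind lines "PATTERNS").getD b)
            (match pvFind lines "RELATIONSHIP" with
             | some v => PySem.Str.lower v | none => c)
            ((pvFind lines "CONTEXT_IMPACT").getD e) := by
  induction lines with
  | nil => intro a b c e; simp [pvFind, pvFindGo]
  | cons l rest ih =>
    intro a b c e
    rw [List.foldl_cons, step_eq, ih,
        pvFind_cons, pvFind_cons, pvFind_cons, pvFind_cons]
    congr 1
    · cases pvFind rest "RELEVANT_MEMORIES" <;> rfl
    · cases pvFind rest "PATTERNS" <;> rfl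
    · cases pvFind rest "RELATIONSHIP" <;> rfl
    · cases pvFind rest "CONTEXT_IMPACT" <;> rfl

-- ===== VERDICT (by name: the statement is the Claim_ definition above) =====
theorem parse_memory_response_py_spec : Claim_equal_parse_memory_response_py := by
  intro response _
  unfold Spec_parse_memory_response_py
  show parse_memory_response_py response = parse_memory_response_py_alt response
  -- A's initial dict literal computes (definitionally) to the four-key record pvMk4 "" "" "neutral" ""
  have h : parse_memory_response_py response =
      (((PySem.Str.split? (PySem.Str.strip response) "\n").getD []).foldl pvAStep
        (pvMk4 "" "" "neutral" "")).items := rfl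
  rw [h, fold_char]
  rfl
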